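-- pv_equiv track=rewrite | github.com/rohan5551/singlepasschunking | src/processors/lmm_processor.py | _derive_heading_hierarchy
-- ===== SOURCE A (Python) =====
-- from typing import Any, Dict, List, Optional
--
-- def _derive_heading_hierarchy(text: str) -> Dict[str, str]:
--     hierarchy: Dict[str, str] = {}
--
--     for line in text.splitlines():
--         stripped = line.strip()
--         if stripped.startswith("# ") and "level1" not in hierarchy:
--             hierarchy["level1"] = stripped[2:].strip()
--         elif stripped.startswith("## ") and "level2" not in hierarchy:
--             hierarchy["level2"] = stripped[3:].strip()
--         elif stripped.startswith("### ") and "level3" not in hierarchy: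
--             hierarchy["level3"] = stripped[4:].strip()
--
--         if len(hierarchy) == 3:
--             break
--
--     return hierarchy
-- ===== SOURCE B (Python) =====
-- def _derive_heading_hierarchy(text: str):
--     lines = text.splitlines()
--     hits = []
--     for key, marker in (("level1", "# "), ("level2", "## "), ("level3", "### ")):
--         hit = next(((i, key, line.strip()[len(marker):].strip())
--                     for i, line in enumerate(lines)
--                     if line.strip().startswith(marker)), None)
--         if hit is not None:
--             hits.append(hit)
--     return {key: value for _, key, value in sorted(hits, key=lambda h: h[0])}
-- ===== Notes on version B (the rewrite author's own statement) =====
-- stated objective: alternative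
-- what changed: Replaces A's single precedence-ordered pass with dict state and an early break by three independent first-match scans (one per heading level) whose hits are then sorted by line index to recover encounter order.
import Mathlib
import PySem

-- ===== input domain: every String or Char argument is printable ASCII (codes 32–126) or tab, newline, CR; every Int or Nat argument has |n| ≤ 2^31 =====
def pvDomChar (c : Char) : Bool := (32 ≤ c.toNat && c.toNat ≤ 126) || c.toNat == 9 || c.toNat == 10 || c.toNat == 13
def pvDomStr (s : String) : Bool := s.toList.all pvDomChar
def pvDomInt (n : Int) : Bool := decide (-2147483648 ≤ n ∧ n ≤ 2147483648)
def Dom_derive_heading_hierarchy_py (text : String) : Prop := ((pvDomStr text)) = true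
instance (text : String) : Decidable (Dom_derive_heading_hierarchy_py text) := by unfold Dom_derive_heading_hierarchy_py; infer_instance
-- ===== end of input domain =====

-- B replaces A's single precedence-ordered pass (dict + early break) by three independent
-- per-level first-match scans whose hits are sorted by line index: an alternative decomposition.

-- ===== PORT A =====
-- the for-loop over splitlines with the dict accumulator and the len==3 break
def pvALoop : List String → PySem.Dict String String → PySem.Dict String String
  | [], h => h
  | line :: rest, h =>
    let stripped := PySem.Str.strip line
    let h' :=
      if PySem.Str.startswith stripped "# " && !(h.contains "level1") then
        h.insert "level1" (PySem.Str.strip (PySem.Str.slice stripped (some 2) none))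
      else if PySem.Str.startswith stripped "## " && !(h.contains "level2") then
        h.insert "level2" (PySem.Str.strip (PySem.Str.slice stripped (some 3) none))
      else if PySem.Str.startswith stripped "### " && !(h.contains "level3") then
        h.insert "level3" (PySem.Str.strip (PySem.Str.slice stripped (some 4) none))
      else h
    if h'.size == 3 then h' else pvALoop rest h'

def derive_heading_hierarchy_py (text : String) : List (String × String) :=
  (pvALoop (PySem.Str.splitlines text) PySem.Dict.empty).items

-- ===== PORT B =====
-- next(((i, key, …) for i, line in enumerate(lines) if line.strip().startswith(marker)), None)
def pvFindHit (marker : String) : Int → List String → Option (Int × String)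
  | _, [] => none
  | i, line :: rest =>
    let s := PySem.Str.strip line
    if PySem.Str.startswith s marker then
      some (i, PySem.Str.strip (PySem.Str.slice s (some (PySem.Str.len marker : Int)) none))
    else pvFindHit marker (i + 1) rest

def derive_heading_hierarchy_py_alt (text : String) : List (String × String) :=
  let lines := PySem.Str.splitlines text
  let hits := [("level1", "# "), ("level2", "## "), ("level3", "### ")].foldl
    (fun (acc : List (Int × String × String)) lm =>
      match pvFindHit lm.2 0 lines with
      | some hit => acc ++ [(hit.1, lm.1, hit.2)]
      | none => acc) []
  -- the final dict comprehension inserts pairwise-distinct keys, so its items list is this map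
  (PySem.List.sorted hits (fun h => h.1) false).map (fun h => (h.2.1, h.2.2))

-- ===== PRECONDITION & SPEC =====
def Spec_derive_heading_hierarchy_py (text : String) (out : List (String × String)) : Prop := out = derive_heading_hierarchy_py_alt text
instance (text : String) (out : List (String × String)) : Decidable (Spec_derive_heading_hierarchy_py text out) := by unfold Spec_derive_heading_hierarchy_py; infer_instance

-- ===== CLAIM (what is proved, stated in full; the proofs are below) =====
def Claim_equal_derive_heading_hierarchy_py : Prop := ∀ (text : String), Dom_derive_heading_hierarchy_py text → Spec_derive_heading_hierarchy_py text (derive_heading_hierarchy_py text)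

-- ===== LEMMAS AND PROOFS =====

-- the common reference sequence: hits in encounter order, with per-level "still needed" flags
def pvSpecSeq (n1 n2 n3 : Bool) (i : Int) : List String → List (Int × String × String)
  | [] => []
  | line :: rest =>
    let s := PySem.Str.strip line
    if n1 && PySem.Str.startswith s "# " then
      (i, "level1", PySem.Str.strip (PySem.Str.slice s (some 2) none)) :: pvSpecSeq false n2 n3 (i + 1) rest
    else if n2 && PySem.Str.startswith s "## " then
      (i, "level2", PySem.Str.strip (PySem.Str.slice s (some 3) none)) :: pvSpecSeq n1 false n3 (i + 1) rest
    else if n3 && PySem.Str.startswith s "### " then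
      (i, "level3", PySem.Str.strip (PySem.Str.slice s (some 4) none)) :: pvSpecSeq n1 n2 false (i + 1) rest
    else pvSpecSeq n1 n2 n3 (i + 1) rest

lemma pvSpecSeq_false : ∀ (i : Int) (l : List String), pvSpecSeq false false false i l = [] := by
  intro i l
  induction l generalizing i with
  | nil => rfl
  | cons a t ih => simp [pvSpecSeq, ih]

lemma pvSpecSeq_lb : ∀ (l : List String) (n1 n2 n3 : Bool) (i : Int) (x : Int × String × String),
    x ∈ pvSpecSeq n1 n2 n3 i l → i ≤ x.1 := by
  intro l
  induction l with
  | nil => intro n1 n2 n3 i x hx; simp [pvSpecSeq] at hx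
  | cons a t ih =>
    intro n1 n2 n3 i x hx
    simp only [pvSpecSeq] at hx
    split_ifs at hx <;>
      first
      | (rcases List.mem_cons.mp hx with h | h
         · subst h; simp
         · have := ih _ _ _ _ _ h; omega)
      | (have := ih _ _ _ _ _ hx; omega)

lemma pvSpecSeq_pairwise : ∀ (l : List String) (n1 n2 n3 : Bool) (i : Int),
    (pvSpecSeq n1 n2 n3 i l).Pairwise (fun a b => a.1 < b.1) := by
  intro l
  induction l with
  | nil => intro n1 n2 n3 i; simp [pvSpecSeq]
  | cons a t ih =>
    intro n1 n2 n3 i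
    simp only [pvSpecSeq]
    split_ifs <;>
      first
      | exact (List.pairwise_cons).mpr
          ⟨fun y hy => by have := pvSpecSeq_lb _ _ _ _ _ _ hy; simpa using (by omega : i < y.1), ih _ _ _ _⟩
      | exact ih _ _ _ _

-- marker exclusivity: a stripped line starts with at most one of "# ", "## ", "### "
lemma pvEx12 (s : String) (h : PySem.Str.startswith s "# " = true) :
    PySem.Str.startswith s "## " = false := by
  by_contra hb
  have h2 : PySem.Str.startswith s "## " = true := by
    cases hh : PySem.Str.startswith s "## " <;> simp_all
  rw [PySem.Str.startswith_eq] at h h2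
  rw [PySem.Chars.startswith_iff] at h h2
  obtain ⟨t1, e1⟩ := h
  obtain ⟨t2, e2⟩ := h2
  rw [show ("# " : String).toList = ['#', ' '] from rfl] at e1
  rw [show ("## " : String).toList = ['#', '#', ' '] from rfl] at e2
  rw [← e1] at e2
  simp at e2

lemma pvEx13 (s : String) (h : PySem.Str.startswith s "# " = true) :
    PySem.Str.startswith s "### " = false := by
  by_contra hb
  have h2 : PySem.Str.startswith s "### " = true := by
    cases hh : PySem.Str.startswith s "### " <;> simp_all
  rw [PySem.Str.startswith_eq] at h h2
  rw [PySem.Chars.startswith_iff] at h h2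
  obtain ⟨t1, e1⟩ := h
  obtain ⟨t2, e2⟩ := h2
  rw [show ("# " : String).toList = ['#', ' '] from rfl] at e1
  rw [show ("### " : String).toList = ['#', '#', '#', ' '] from rfl] at e2
  rw [← e1] at e2
  simp at e2

lemma pvEx23 (s : String) (h : PySem.Str.startswith s "## " = true) :
    PySem.Str.startswith s "### " = false := by
  by_contra hb
  have h2 : PySem.Str.startswith s "### " = true := by
    cases hh : PySem.Str.startswith s "### " <;> simp_all
  rw [PySem.Str.startswith_eq] at h h2
  rw [PySem.Chars.startswith_iff] at h h2
  obtain ⟨t1, e1⟩ := h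
  obtain ⟨t2, e2⟩ := h2
  rw [show ("## " : String).toList = ['#', '#', ' '] from rfl] at e1
  rw [show ("### " : String).toList = ['#', '#', '#', ' '] from rfl] at e2
  rw [← e1] at e2
  simp at e2

-- A-side: the loop appends exactly the encounter-order hit sequence of the still-needed levels
lemma pvALoop_items : ∀ (lines : List String) (h : PySem.Dict String String)
    (n1 n2 n3 : Bool) (i : Int),
    h.contains "level1" = !n1 → h.contains "level2" = !n2 → h.contains "level3" = !n3 →
    h.size = ((if n1 then 0 else 1) + (if n2 then 0 else 1) + (if n3 then 0 else 1) : Nat) →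
    (pvALoop lines h).items = h.items ++ (pvSpecSeq n1 n2 n3 i lines).map (fun t => (t.2.1, t.2.2)) := by
  intro lines
  induction lines with
  | nil =>
    intro h n1 n2 n3 i H1 H2 H3 Hs
    simp [pvALoop, pvSpecSeq]
  | cons a t ih =>
    intro h n1 n2 n3 i H1 H2 H3 Hs
    simp only [pvALoop, pvSpecSeq]
    cases hb1 : PySem.Str.startswith (PySem.Str.strip a) "# " with
    | true =>
      have hb2 := pvEx12 _ hb1
      have hb3 := pvEx13 _ hb1
      cases n1 with
      | true =>
        have hc : h.contains "level1" = false := by simpa using H1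
        have hsz : (h.insert "level1" (PySem.Str.strip (PySem.Str.slice (PySem.Str.strip a) (some 2) none))).size = h.size + 1 := by
          rw [PySem.Dict.size_insert]; simp [hc]
        have hit : (h.insert "level1" (PySem.Str.strip (PySem.Str.slice (PySem.Str.strip a) (some 2) none))).items
            = h.items ++ [("level1", PySem.Str.strip (PySem.Str.slice (PySem.Str.strip a) (some 2) none))] :=
          PySem.Dict.items_insert_of_not_contains h _ hc
        simp only [hb2, hb3, hc, Bool.not_false, Bool.true_and, Bool.and_true,
          Bool.false_and, Bool.and_false, Bool.not_true, if_true, if_false,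
  Bool.false_eq_true, Bool.true_eq_false, reduceIte]
        rw [hsz, Hs]
        by_cases hall : n2 = false ∧ n3 = false
        · obtain ⟨e1, e2⟩ := hall; subst e1; subst e2
          rw [if_pos (by decide)]
          simp [hit, pvSpecSeq_false]
        · rw [if_neg (by cases n2 <;> cases n3 <;>
            first
            | exact absurd ⟨rfl, rfl⟩ hall
            | decide)]
          rw [ih _ false n2 n3 (i + 1)
            (by simp [PySem.Dict.contains_insert])
            (by simp [PySem.Dict.contains_insert, H2])
            (by simp [PySem.Dict.contains_insert, H3])
            (by rw [hsz, Hs]; cases n2 <;> cases n3 <;> decide)]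
          simp [hit]
      | false =>
        have hc : h.contains "level1" = true := by simpa using H1
        simp only [hb2, hb3, hc, Bool.not_true, Bool.true_and, Bool.and_true,
          Bool.false_and, Bool.and_false, if_true, if_false,
  Bool.false_eq_true, Bool.true_eq_false, reduceIte]
        rw [Hs]
        by_cases hall : n2 = false ∧ n3 = false
        · obtain ⟨e1, e2⟩ := hall; subst e1; subst e2
          rw [if_pos (by decide)]
          simp [pvSpecSeq_false]
        · rw [if_neg (by cases n2 <;> cases n3 <;>
            first
            | exact absurd ⟨rfl, rfl⟩ hall
            | decide)]
          exact ih _ false n2 n3 (i + 1) H1 H2 H3 (by rw [Hs])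
    | false =>
      cases hb2 : PySem.Str.startswith (PySem.Str.strip a) "## " with
      | true =>
        have hb3 := pvEx23 _ hb2
        cases n2 with
        | true =>
          have hc : h.contains "level2" = false := by simpa using H2
          have hsz : (h.insert "level2" (PySem.Str.strip (PySem.Str.slice (PySem.Str.strip a) (some 3) none))).size = h.size + 1 := by
            rw [PySem.Dict.size_insert]; simp [hc]
          have hit : (h.insert "level2" (PySem.Str.strip (PySem.Str.slice (PySem.Str.strip a) (some 3) none))).items
              = h.items ++ [("level2", PySem.Str.strip (PySem.Str.slice (PySem.Str.strip a) (some 3) none))] :=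
            PySem.Dict.items_insert_of_not_contains h _ hc
          simp only [hb3, hc, Bool.not_false, Bool.true_and, Bool.and_true,
            Bool.false_and, Bool.and_false, Bool.not_true, if_true, if_false,
  Bool.false_eq_true, Bool.true_eq_false, reduceIte]
          rw [hsz, Hs]
          by_cases hall : n1 = false ∧ n3 = false
          · obtain ⟨e1, e2⟩ := hall; subst e1; subst e2
            rw [if_pos (by decide)]
            simp [hit, pvSpecSeq_false]
          · rw [if_neg (by cases n1 <;> cases n3 <;>
              first
              | exact absurd ⟨rfl, rfl⟩ hall
              | decide)]
            rw [ih _ n1 false n3 (i + 1)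
              (by simp [PySem.Dict.contains_insert, H1])
              (by simp [PySem.Dict.contains_insert])
              (by simp [PySem.Dict.contains_insert, H3])
              (by rw [hsz, Hs]; cases n1 <;> cases n3 <;> decide)]
            simp [hit]
        | false =>
          have hc : h.contains "level2" = true := by simpa using H2
          simp only [hb3, hc, Bool.not_true, Bool.true_and, Bool.and_true,
            Bool.false_and, Bool.and_false, if_true, if_false,
  Bool.false_eq_true, Bool.true_eq_false, reduceIte]
          rw [Hs]
          by_cases hall : n1 = false ∧ n3 = false
          · obtain ⟨e1, e2⟩ := hall; subst e1; subst e2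
            rw [if_pos (by decide)]
            simp [pvSpecSeq_false]
          · rw [if_neg (by cases n1 <;> cases n3 <;>
              first
              | exact absurd ⟨rfl, rfl⟩ hall
              | decide)]
            exact ih _ n1 false n3 (i + 1) H1 H2 H3 (by rw [Hs])
      | false =>
        cases hb3 : PySem.Str.startswith (PySem.Str.strip a) "### " with
        | true =>
          cases n3 with
          | true =>
            have hc : h.contains "level3" = false := by simpa using H3
            have hsz : (h.insert "level3" (PySem.Str.strip (PySem.Str.slice (PySem.Str.strip a) (some 4) none))).size = h.size + 1 := by
              rw [PySem.Dict.size_insert]; simp [hc]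
            have hit : (h.insert "level3" (PySem.Str.strip (PySem.Str.slice (PySem.Str.strip a) (some 4) none))).items
                = h.items ++ [("level3", PySem.Str.strip (PySem.Str.slice (PySem.Str.strip a) (some 4) none))] :=
              PySem.Dict.items_insert_of_not_contains h _ hc
            simp only [hb1, hc, Bool.not_false, Bool.true_and, Bool.and_true,
              Bool.false_and, Bool.and_false, Bool.not_true, if_true, if_false,
  Bool.false_eq_true, Bool.true_eq_false, reduceIte]
            rw [hsz, Hs]
            by_cases hall : n1 = false ∧ n2 = false
            · obtain ⟨e1, e2⟩ := hall; subst e1; subst e2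
              rw [if_pos (by decide)]
              simp [hit, pvSpecSeq_false]
            · rw [if_neg (by cases n1 <;> cases n2 <;>
                first
                | exact absurd ⟨rfl, rfl⟩ hall
                | decide)]
              rw [ih _ n1 n2 false (i + 1)
                (by simp [PySem.Dict.contains_insert, H1])
                (by simp [PySem.Dict.contains_insert, H2])
                (by simp [PySem.Dict.contains_insert])
                (by rw [hsz, Hs]; cases n1 <;> cases n2 <;> decide)]
              simp [hit]
          | false =>
            have hc : h.contains "level3" = true := by simpa using H3
            simp only [hb1, hc, Bool.not_true, Bool.true_and, Bool.and_true,
              Bool.false_and, Bool.and_false, if_true, if_false,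
  Bool.false_eq_true, Bool.true_eq_false, reduceIte]
            rw [Hs]
            by_cases hall : n1 = false ∧ n2 = false
            · obtain ⟨e1, e2⟩ := hall; subst e1; subst e2
              rw [if_pos (by decide)]
              simp [pvSpecSeq_false]
            · rw [if_neg (by cases n1 <;> cases n2 <;>
                first
                | exact absurd ⟨rfl, rfl⟩ hall
                | decide)]
              exact ih _ n1 n2 false (i + 1) H1 H2 H3 (by rw [Hs])
        | false =>
          simp only [hb1, Bool.true_and, Bool.and_true,
            Bool.false_and, Bool.and_false, if_true, if_false,
  Bool.false_eq_true, Bool.true_eq_false, reduceIte]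
          rw [Hs]
          by_cases hall : n1 = false ∧ n2 = false ∧ n3 = false
          · obtain ⟨e1, e2, e3⟩ := hall; subst e1; subst e2; subst e3
            rw [if_pos (by decide)]
            simp [pvSpecSeq_false]
          · rw [if_neg (by cases n1 <;> cases n2 <;> cases n3 <;>
              first
              | exact absurd ⟨rfl, rfl, rfl⟩ hall
              | decide)]
            exact ih _ n1 n2 n3 (i + 1) H1 H2 H3 (by rw [Hs])

lemma pvLen2 : (PySem.Str.len "# " : Int) = 2 := by decide
lemma pvLen3 : (PySem.Str.len "## " : Int) = 3 := by decide
lemma pvLen4 : (PySem.Str.len "### " : Int) = 4 := by decide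

-- B-side: the three per-level scans are a permutation of the encounter-order hit sequence
set_option maxHeartbeats 1600000 in
lemma pvHits_perm : ∀ (lines : List String) (n1 n2 n3 : Bool) (i : Int),
    (pvSpecSeq n1 n2 n3 i lines).Perm
      ((if n1 then (match pvFindHit "# " i lines with
          | some hit => [(hit.1, "level1", hit.2)] | none => []) else []) ++
       (if n2 then (match pvFindHit "## " i lines with
          | some hit => [(hit.1, "level2", hit.2)] | none => []) else []) ++
       (if n3 then (match pvFindHit "### " i lines with
          | some hit => [(hit.1, "level3", hit.2)] | none => []) else [])) := by
  intro lines
  induction lines with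
  | nil =>
    intro n1 n2 n3 i
    cases n1 <;> cases n2 <;> cases n3 <;> simp [pvSpecSeq, pvFindHit]
  | cons a t ih =>
    intro n1 n2 n3 i
    cases hb1 : PySem.Str.startswith (PySem.Str.strip a) "# " with
    | true =>
      have hb2 := pvEx12 _ hb1
      have hb3 := pvEx13 _ hb1
      cases n1 with
      | true =>
        have htail := ih false n2 n3 (i + 1)
        simp only [Bool.false_eq_true, if_false, List.nil_append, List.append_nil] at htail
        simp only [pvSpecSeq, pvFindHit, hb1, hb2, hb3, pvLen2, Bool.true_and, Bool.false_and,
          Bool.and_false, if_true, if_false, Bool.false_eq_true, Bool.true_eq_false, List.cons_append, List.nil_append, List.append_nil]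
        exact htail.cons _
      | false =>
        have htail := ih false n2 n3 (i + 1)
        simp only [Bool.false_eq_true, if_false, List.nil_append, List.append_nil] at htail
        simp only [pvSpecSeq, pvFindHit, hb1, hb2, hb3, Bool.true_and, Bool.false_and,
          Bool.and_false, if_true, if_false, Bool.false_eq_true, Bool.true_eq_false, List.nil_append, List.append_nil]
        exact htail
    | false =>
      cases hb2 : PySem.Str.startswith (PySem.Str.strip a) "## " with
      | true =>
        have hb3 := pvEx23 _ hb2
        cases n2 with
        | true =>
          have htail := ih n1 false n3 (i + 1)
          simp only [Bool.false_eq_true, if_false, List.nil_append, List.append_nil] at htail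
          simp only [pvSpecSeq, pvFindHit, hb1, hb2, hb3, pvLen3, Bool.true_and, Bool.false_and,
            Bool.and_false, if_true, if_false, Bool.false_eq_true, Bool.true_eq_false, List.cons_append, List.nil_append, List.append_nil]
          refine (htail.cons _).trans ?_
          rw [List.append_assoc, List.singleton_append]
          exact List.perm_middle.symm
        | false =>
          have htail := ih n1 false n3 (i + 1)
          simp only [Bool.false_eq_true, if_false, List.nil_append, List.append_nil] at htail
          simp only [pvSpecSeq, pvFindHit, hb1, hb2, hb3, Bool.true_and, Bool.false_and,
            Bool.and_false, if_true, if_false, Bool.false_eq_true, Bool.true_eq_false, List.nil_append, List.append_nil]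
          exact htail
      | false =>
        cases hb3 : PySem.Str.startswith (PySem.Str.strip a) "### " with
        | true =>
          cases n3 with
          | true =>
            have htail := ih n1 n2 false (i + 1)
            simp only [Bool.false_eq_true, if_false, List.nil_append, List.append_nil] at htail
            simp only [pvSpecSeq, pvFindHit, hb1, hb2, hb3, pvLen4, Bool.true_and, Bool.false_and,
              Bool.and_false, if_true, if_false, Bool.false_eq_true, Bool.true_eq_false, List.cons_append, List.nil_append, List.append_nil]
            refine (htail.cons _).trans ?_
            exact (List.perm_append_singleton _ _).symm
          | false =>
            have htail := ih n1 n2 false (i + 1)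
            simp only [Bool.false_eq_true, if_false, List.nil_append, List.append_nil] at htail
            simp only [pvSpecSeq, pvFindHit, hb1, hb2, hb3, Bool.true_and, Bool.false_and,
              Bool.and_false, if_true, if_false, Bool.false_eq_true, Bool.true_eq_false, List.nil_append, List.append_nil]
            exact htail
        | false =>
          have htail := ih n1 n2 n3 (i + 1)
          simp only [pvSpecSeq, pvFindHit, hb1, hb2, hb3, Bool.and_false, if_false, Bool.false_eq_true, Bool.true_eq_false]
          exact htail

-- ===== VERDICT (by name: the statement is the Claim_ definition above) =====
theorem derive_heading_hierarchy_py_spec : Claim_equal_derive_heading_hierarchy_py := by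
  intro text _
  unfold Spec_derive_heading_hierarchy_py derive_heading_hierarchy_py derive_heading_hierarchy_py_alt
  set lines := PySem.Str.splitlines text with hl
  have hA := pvALoop_items lines PySem.Dict.empty true true true 0
    (by simp [PySem.Dict.contains_empty]) (by simp [PySem.Dict.contains_empty])
    (by simp [PySem.Dict.contains_empty]) (by simp [PySem.Dict.size_empty])
  have hempty : (PySem.Dict.empty : PySem.Dict String String).items = [] := rfl
  rw [hA, hempty, List.nil_append]
  -- the hits list of B is the three option-lists appended
  have hhits : ([("level1", "# "), ("level2", "## "), ("level3", "### ")].foldl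
      (fun (acc : List (Int × String × String)) lm =>
        match pvFindHit lm.2 0 lines with
        | some hit => acc ++ [(hit.1, lm.1, hit.2)]
        | none => acc) []) =
      ((match pvFindHit "# " 0 lines with
          | some hit => [(hit.1, "level1", hit.2)] | none => []) ++
       (match pvFindHit "## " 0 lines with
          | some hit => [(hit.1, "level2", hit.2)] | none => []) ++
       (match pvFindHit "### " 0 lines with
          | some hit => [(hit.1, "level3", hit.2)] | none => [])) := by
    cases h1 : pvFindHit "# " 0 lines <;> cases h2 : pvFindHit "## " 0 lines <;>
      cases h3 : pvFindHit "### " 0 lines <;> simp [List.foldl, h1, h2, h3]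
  simp only [hhits]
  have hperm := pvHits_perm lines true true true 0
  simp only [if_true] at hperm
  rw [PySem.List.sorted_eq_of_perm_of_pairwise_lt _ _ _ hperm (pvSpecSeq_pairwise lines true true true 0)]
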